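-- pv_equiv track=rewrite | github.com/korenkaplan/Dev-Skill-Compass-Server | logic/text_analysis/tech_term_finder.py | remove_subsets
-- ===== SOURCE A (Python) =====
-- def remove_subsets(tech_list: list) -> set:
--     """
--     Remove subsets from a list of technical terms.
--
--     Parameters:
--     tech_list (list): A list of technical terms.
--
--     Returns:
--     set: A set of technical terms with subsets removed.
--     """
--     cleaned_tech_set = set()  # Initialize an empty set to store cleaned tech words
--     for i, tech_word in enumerate(tech_list):
--         # Check if the current tech word is not a subset of any other tech word in the list
--         if not any(
--                 tech_word != other_word and set(tech_word.split()).issubset(set(other_word.split()))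
--                 for j, other_word in enumerate(tech_list) if i != j
--         ):
--             # If the current tech word is not a subset, add it to the cleaned set
--             cleaned_tech_set.add(tech_word)
--     return cleaned_tech_set
-- ===== SOURCE B (Python) =====
-- def remove_subsets(tech_list: list) -> set:
--     # Group the distinct strings by a canonical token key, then decide survival
--     # from the keys alone: keep a word iff its key is produced by exactly one
--     # distinct string and is not a subset of any other key.
--     distinct = list(dict.fromkeys(tech_list))
--     keys = [tuple(sorted(set(w.split()))) for w in distinct]
--     result = set()
--     for w, k in zip(distinct, keys):
--         if keys.count(k) == 1 and not any(g != k and set(k).issubset(g) for g in keys):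
--             result.add(w)
--     return result
-- ===== Notes on version B (the rewrite author's own statement) =====
-- stated objective: faster
-- what changed: Instead of A's all-pairs index scan that re-splits every string for every pair, B dedups to the distinct strings, precomputes one canonical sorted token key per distinct string, and keeps a word iff its key occurs exactly once among the keys and is a subset of no other key.
import Mathlib
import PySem

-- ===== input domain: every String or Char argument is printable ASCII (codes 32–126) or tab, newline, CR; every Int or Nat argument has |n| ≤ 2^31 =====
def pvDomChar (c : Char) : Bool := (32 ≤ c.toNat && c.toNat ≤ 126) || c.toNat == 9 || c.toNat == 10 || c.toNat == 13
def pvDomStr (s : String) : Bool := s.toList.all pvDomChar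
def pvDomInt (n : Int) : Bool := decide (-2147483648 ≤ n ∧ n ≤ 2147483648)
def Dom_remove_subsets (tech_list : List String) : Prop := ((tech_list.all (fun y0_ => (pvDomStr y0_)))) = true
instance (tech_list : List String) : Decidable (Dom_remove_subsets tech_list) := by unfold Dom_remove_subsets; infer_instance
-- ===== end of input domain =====

-- B replaces A's all-pairs index scan by: dedup to the distinct strings, precompute one
-- canonical token key per distinct string, then keep a word iff its key occurs once and is
-- not a subset of another key (objective: faster — measured; equivalence is about the return value).

-- ===== PORT A =====
def remove_subsets (tech_list : List String) : List String :=
  (PySem.List.enumerate tech_list).foldl (fun acc iw =>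
    if (PySem.List.enumerate tech_list).any (fun jo =>
        decide (iw.1 ≠ jo.1) && decide (iw.2 ≠ jo.2) &&
        PySem.Set.issubset (PySem.Set.ofList (PySem.Str.split₀ iw.2))
          (PySem.Set.ofList (PySem.Str.split₀ jo.2)))
    then acc
    else PySem.Set.add acc iw.2) PySem.Set.empty

-- ===== PORT B =====
-- canonical key: tuple(sorted(set(w.split())))
def pvKey (w : String) : List String :=
  PySem.List.sorted (PySem.Set.ofList (PySem.Str.split₀ w)) (fun x => x) false

def remove_subsets_alt (tech_list : List String) : List String :=
  let distinct := PySem.List.dedup tech_list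
  let keys := distinct.map pvKey
  (distinct.zip keys).foldl (fun res wk =>
    if (keys.count wk.2 == 1) &&
       !(keys.any (fun g => decide (g ≠ wk.2) && PySem.Set.issubset (PySem.Set.ofList wk.2) g))
    then PySem.Set.add res wk.1
    else res) PySem.Set.empty

-- ===== PRECONDITION & SPEC =====
def Spec_remove_subsets (tech_list : List String) (out : List String) : Prop := out = remove_subsets_alt tech_list
instance (tech_list : List String) (out : List String) : Decidable (Spec_remove_subsets tech_list out) := by unfold Spec_remove_subsets; infer_instance

-- ===== CLAIM (what is proved, stated in full; the proofs are below) =====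
def Claim_equal_remove_subsets : Prop := ∀ (tech_list : List String), Dom_remove_subsets tech_list → Spec_remove_subsets tech_list (remove_subsets tech_list)

-- ===== LEMMAS AND PROOFS =====

def pvSub (u v : String) : Bool :=
  PySem.Set.issubset (PySem.Set.ofList (PySem.Str.split₀ u)) (PySem.Set.ofList (PySem.Str.split₀ v))

lemma mem_pvKey (x : String) (w : String) : x ∈ pvKey w ↔ x ∈ PySem.Str.split₀ w := by
  simp [pvKey, PySem.List.mem_sorted, PySem.Set.mem_ofList]

lemma nodup_pvKey (w : String) : (pvKey w).Nodup :=
  (PySem.List.sorted_perm _ _ _).nodup_iff.mpr (PySem.Set.nodup_ofList _)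

lemma pvKey_eq_iff (u v : String) :
    pvKey u = pvKey v ↔ ∀ x, x ∈ PySem.Str.split₀ u ↔ x ∈ PySem.Str.split₀ v := by
  constructor
  · intro h x
    rw [← mem_pvKey x u, ← mem_pvKey x v, h]
  · intro h
    have hperm : (PySem.Set.ofList (PySem.Str.split₀ u) : List String).Perm
        (PySem.Set.ofList (PySem.Str.split₀ v)) := by
      rw [List.perm_ext_iff_of_nodup (PySem.Set.nodup_ofList _) (PySem.Set.nodup_ofList _)]
      intro a; simp [PySem.Set.mem_ofList, h a]
    have hp : (pvKey v).Perm (PySem.Set.ofList (PySem.Str.split₀ u)) :=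
      (PySem.List.sorted_perm _ _ _).trans hperm.symm
    simpa [pvKey] using (PySem.List.sorted_eq_of_perm_of_pairwise_lt _ _ _ hp
      (PySem.List.sorted_ofList_pairwise_lt (PySem.Str.split₀ v)))

-- add/filter commute
lemma add_filter {α : Type} [BEq α] [LawfulBEq α] (q : α → Bool) (acc : List α) (x : α) :
    (PySem.Set.add acc x).filter q =
      if q x then PySem.Set.add (acc.filter q) x else acc.filter q := by
  by_cases hx : x ∈ acc
  · have : PySem.Set.add acc x = acc := by
      simp [PySem.Set.add, PySem.Set.contains, hx]
    rw [this]
    by_cases hq : q x = true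
    · have hxf : x ∈ acc.filter q := List.mem_filter.mpr ⟨hx, hq⟩
      simp [hq, PySem.Set.add, PySem.Set.contains, hxf]
    · simp [hq]
  · have : PySem.Set.add acc x = acc ++ [x] := by
      simp [PySem.Set.add, PySem.Set.contains, hx]
    rw [this, List.filter_append]
    by_cases hq : q x = true
    · have hxf : x ∉ acc.filter q := fun h => hx (List.mem_filter.mp h).1
      simp [hq, PySem.Set.add, PySem.Set.contains, hxf]
    · simp [hq]

lemma foldl_add_filter {α : Type} [BEq α] [LawfulBEq α] (q : α → Bool) :
    ∀ (xs acc : List α),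
      (xs.filter q).foldl PySem.Set.add (acc.filter q) = (xs.foldl PySem.Set.add acc).filter q := by
  intro xs
  induction xs with
  | nil => intro acc; simp
  | cons x xs ih =>
    intro acc
    rw [List.filter_cons]
    by_cases hq : q x = true
    · simp only [hq, if_pos]
      have : PySem.Set.add (acc.filter q) x = (PySem.Set.add acc x).filter q := by
        rw [add_filter]; simp [hq]
      simp only [List.foldl_cons, this]
      exact ih (PySem.Set.add acc x)
    · simp only [hq, if_neg, Bool.false_eq_true, not_false_iff, List.foldl_cons]
      have : (PySem.Set.add acc x).filter q = acc.filter q := by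
        rw [add_filter]; simp [hq]
      rw [← this]
      exact ih (PySem.Set.add acc x)

lemma ofList_filter {α : Type} [BEq α] [LawfulBEq α] (q : α → Bool) (xs : List α) :
    PySem.Set.ofList (xs.filter q) = (PySem.Set.ofList xs).filter q := by
  have := foldl_add_filter q xs []
  simpa [PySem.Set.ofList_eq_foldl] using this

lemma countP_eq_one_iff {α : Type} (l : List α) (p : α → Bool) (w : α)
    (hw : w ∈ l) (hpw : p w = true) (hnd : l.Nodup) :
    l.countP p = 1 ↔ ∀ d ∈ l, p d = true → d = w := by
  rw [List.countP_eq_length_filter]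
  constructor
  · intro h d hd hpd
    obtain ⟨a, ha⟩ := List.length_eq_one_iff.mp h
    have h1 : w ∈ l.filter p := List.mem_filter.mpr ⟨hw, hpw⟩
    have h2 : d ∈ l.filter p := List.mem_filter.mpr ⟨hd, hpd⟩
    rw [ha] at h1 h2
    simp at h1 h2
    rw [h2, h1]
  · intro h
    have : l.filter p = [w] := by
      have hmem : w ∈ l.filter p := List.mem_filter.mpr ⟨hw, hpw⟩
      have hnf : (l.filter p).Nodup := hnd.filter p
      have hall : ∀ x ∈ l.filter p, x = w := by
        intro x hx
        have := List.mem_filter.mp hx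
        exact h x this.1 this.2
      cases hf : l.filter p with
      | nil => rw [hf] at hmem; simp at hmem
      | cons a t =>
        rw [hf] at hall hnf
        have ha : a = w := hall a List.mem_cons_self
        have ht : t = [] := by
          cases t with
          | nil => rfl
          | cons b t' =>
            have hb : b = w := hall b (by simp)
            rw [ha, hb] at hnf
            simp at hnf
        rw [ha, ht]
    rw [this]
    rfl

def qA (xs : List String) (w : String) : Bool :=
  !(xs.any (fun o => decide (w ≠ o) && pvSub w o))

def qB (xs : List String) (w : String) : Bool :=
  (((PySem.List.dedup xs).map pvKey).count (pvKey w) == 1) &&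
  !(((PySem.List.dedup xs).map pvKey).any (fun g =>
      decide (g ≠ pvKey w) && PySem.Set.issubset (PySem.Set.ofList (pvKey w)) g))

lemma q_eq (xs : List String) (w : String) (hw : w ∈ xs) : qB xs w = qA xs w := by
  have hwD : w ∈ PySem.List.dedup xs := by rw [PySem.List.mem_dedup]; exact hw
  have hcnt : (((PySem.List.dedup xs).map pvKey).count (pvKey w) == 1) = true ↔
      ∀ d ∈ PySem.List.dedup xs, pvKey d = pvKey w → d = w := by
    rw [beq_iff_eq, List.count_eq_countP, List.countP_map]
    have h := countP_eq_one_iff (PySem.List.dedup xs)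
      ((fun x => x == pvKey w) ∘ pvKey) w hwD (by simp) (PySem.List.nodup_dedup xs)
    rw [h]
    constructor
    · intro h2 d hd he; exact h2 d hd (by simp [he])
    · intro h2 d hd he; exact h2 d hd (by simpa using he)
  have hany : (((PySem.List.dedup xs).map pvKey).any (fun g =>
      decide (g ≠ pvKey w) && PySem.Set.issubset (PySem.Set.ofList (pvKey w)) g)) = true ↔
      ∃ d ∈ PySem.List.dedup xs, pvKey d ≠ pvKey w ∧
        ∀ x ∈ PySem.Str.split₀ w, x ∈ PySem.Str.split₀ d := by
    simp only [List.any_map, Function.comp, List.any_eq_true, Bool.and_eq_true, decide_eq_true_eq,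
      PySem.Set.ofList_eq_self_of_nodup (pvKey w) (nodup_pvKey w), PySem.Set.issubset_iff]
    constructor
    · rintro ⟨d, hd, hne, hsub⟩
      exact ⟨d, hd, hne, fun x hx => (mem_pvKey x d).mp (hsub x ((mem_pvKey x w).mpr hx))⟩
    · rintro ⟨d, hd, hne, hsub⟩
      exact ⟨d, hd, hne, fun x hx => (mem_pvKey x d).mpr (hsub x ((mem_pvKey x w).mp hx))⟩
  have hA : qA xs w = true ↔
      ¬ ∃ o ∈ xs, w ≠ o ∧ ∀ x ∈ PySem.Str.split₀ w, x ∈ PySem.Str.split₀ o := by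
    simp [qA, pvSub, PySem.Set.issubset_iff, PySem.Set.mem_ofList]
  rw [Bool.eq_iff_iff, hA]
  simp only [qB, Bool.and_eq_true]
  rw [hcnt, Bool.not_eq_true', Bool.eq_false_iff, Ne, hany]
  constructor
  · rintro ⟨h1, h2⟩ ⟨o, ho, hne, hsub⟩
    have hoD : o ∈ PySem.List.dedup xs := (PySem.List.mem_dedup _ _).mpr ho
    by_cases hk : pvKey o = pvKey w
    · exact hne ((h1 o hoD hk).symm)
    · exact h2 ⟨o, hoD, hk, hsub⟩
  · intro h
    constructor
    · intro d hd hk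
      by_contra hdw
      exact h ⟨d, (PySem.List.mem_dedup _ _).mp hd, fun he => hdw he.symm,
        fun x hx => ((pvKey_eq_iff d w).mp hk x).mpr hx⟩
    · rintro ⟨d, hd, hk, hsub⟩
      have hdw : w ≠ d := fun he => hk (by rw [← he])
      exact h ⟨d, (PySem.List.mem_dedup _ _).mp hd, hdw, hsub⟩



lemma any_enum_eq (xs : List String) (i : Int) (w : String)
    (hp : (i, w) ∈ PySem.List.enumerate xs 0) :
    ((PySem.List.enumerate xs 0).any (fun jo =>
        decide (i ≠ jo.1) && decide (w ≠ jo.2) && pvSub w jo.2))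
      = xs.any (fun o => decide (w ≠ o) && pvSub w o) := by
  obtain ⟨k0, hk0, hpe⟩ := (PySem.List.mem_enumerate_iff _ _ _).mp hp
  have hi : i = (k0 : Int) := by simpa using congrArg Prod.fst hpe
  have hwv : w = xs[k0] := by simpa using congrArg Prod.snd hpe
  rw [Bool.eq_iff_iff]
  simp only [List.any_eq_true, Bool.and_eq_true, decide_eq_true_eq]
  constructor
  · rintro ⟨⟨j, o⟩, hm, ⟨hij, hwo⟩, hsub⟩
    obtain ⟨k, hk, he⟩ := (PySem.List.mem_enumerate_iff _ _ _).mp hm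
    have ho : o = xs[k] := by simpa using congrArg Prod.snd he
    exact ⟨o, by rw [ho]; exact List.getElem_mem hk, hwo, hsub⟩
  · rintro ⟨o, ho, hwo, hsub⟩
    obtain ⟨k, hk, hko⟩ := List.mem_iff_getElem.mp ho
    refine ⟨((k : Int), o), (PySem.List.mem_enumerate_iff _ _ _).mpr ⟨k, hk, by simp [hko]⟩,
      ⟨?_, hwo⟩, hsub⟩
    intro hik
    apply hwo
    have hkk : k0 = k := by rw [hi] at hik; exact_mod_cast (by simpa using hik)
    subst hkk
    rw [hwv, hko]
  

lemma A_eq_filter (xs : List String) :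
    remove_subsets xs = PySem.Set.ofList (xs.filter (qA xs)) := by
  unfold remove_subsets
  rw [PySem.List.foldl_congr_mem (g := fun acc iw =>
        if xs.any (fun o => decide (iw.2 ≠ o) && pvSub iw.2 o) then acc
        else PySem.Set.add acc iw.2)]
  · have hfun : (fun (acc : List String) (w : String) =>
        if (xs.any fun o => decide (w ≠ o) && pvSub w o) = true then acc
        else PySem.Set.add acc w)
        = (fun acc w => if qA xs w = true then PySem.Set.add acc w else acc) := by
      funext acc w
      unfold qA
      cases xs.any fun o => decide (w ≠ o) && pvSub w o <;> simp
    calc ((PySem.List.enumerate xs).foldl (fun acc iw =>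
            if (xs.any fun o => decide (iw.2 ≠ o) && pvSub iw.2 o) = true then acc
            else PySem.Set.add acc iw.2) PySem.Set.empty)
        = ((PySem.List.enumerate xs).map (·.2)).foldl (fun acc w =>
            if (xs.any fun o => decide (w ≠ o) && pvSub w o) = true then acc
            else PySem.Set.add acc w) PySem.Set.empty := by rw [List.foldl_map]
      _ = xs.foldl (fun acc w =>
            if (xs.any fun o => decide (w ≠ o) && pvSub w o) = true then acc
            else PySem.Set.add acc w) PySem.Set.empty := by
            rw [PySem.List.map_snd_enumerate]
      _ = (xs.filter (qA xs)).foldl PySem.Set.add PySem.Set.empty := by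
            rw [hfun, PySem.List.foldl_if_eq_foldl_filter]
      _ = PySem.Set.ofList (xs.filter (qA xs)) := (PySem.Set.ofList_eq_foldl _).symm
  · intro acc x hx
    rcases x with ⟨i, w⟩
    simp only [show ∀ u v : String,
        (PySem.Set.ofList (PySem.Str.split₀ u)).issubset (PySem.Set.ofList (PySem.Str.split₀ v))
          = pvSub u v from fun _ _ => rfl]
    rw [any_enum_eq xs i w hx]

lemma B_eq_filter (xs : List String) :
    remove_subsets_alt xs = (PySem.List.dedup xs).filter (qB xs) := by
  unfold remove_subsets_alt
  simp only []
  have hzip : (PySem.List.dedup xs).zip ((PySem.List.dedup xs).map pvKey)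
      = (PySem.List.dedup xs).map (fun w => (w, pvKey w)) := by
    simpa using (List.zip_map' (f := id) (g := pvKey) (l := PySem.List.dedup xs))
  rw [hzip, List.foldl_map]
  have hfun : (fun (res : List String) (w : String) =>
      if ((((PySem.List.dedup xs).map pvKey).count (w, pvKey w).2 == 1) &&
          !(((PySem.List.dedup xs).map pvKey).any (fun g =>
              decide (g ≠ (w, pvKey w).2) &&
              PySem.Set.issubset (PySem.Set.ofList (w, pvKey w).2) g))) = true
      then PySem.Set.add res (w, pvKey w).1 else res)
      = (fun res w => if qB xs w = true then PySem.Set.add res w else res) := by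
    funext res w
    rfl
  rw [hfun, PySem.List.foldl_if_eq_foldl_filter]
  have he : List.foldl PySem.Set.add PySem.Set.empty (List.filter (qB xs) (PySem.List.dedup xs))
      = PySem.Set.ofList (List.filter (qB xs) (PySem.List.dedup xs)) :=
    (PySem.Set.ofList_eq_foldl _).symm
  rw [he]
  exact PySem.Set.ofList_eq_self_of_nodup _ ((PySem.List.nodup_dedup xs).filter _)

lemma ports_agree (xs : List String) : remove_subsets xs = remove_subsets_alt xs := by
  rw [A_eq_filter, B_eq_filter, ofList_filter, ← PySem.List.dedup_eq_ofList]
  exact List.filter_congr (fun w hw => (q_eq xs w ((PySem.List.mem_dedup _ _).mp hw)).symm)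

-- ===== VERDICT (by name: the statement is the Claim_ definition above) =====
theorem remove_subsets_spec : Claim_equal_remove_subsets := by
  intro tech_list _
  show remove_subsets tech_list = remove_subsets_alt tech_list
  exact ports_agree tech_list
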